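-- pv_equiv track=rewrite | github.com/eliosev/prog-basic-activity | ipa-2.py | shift_letter
-- ===== SOURCE A (Python) =====
-- def shift_letter(letter, shift):
--     list_of_alphabet = ['A','B','C','D','E','F','G','H','I','J','K','L','M','N','O','P','Q','R','S','T','U','V','W','X','Y','Z']
--     if (letter in list_of_alphabet) == True:
--         for i in list_of_alphabet:
--             if list_of_alphabet.index(i) == (shift % 26):
--                 return list_of_alphabet[(list_of_alphabet.index(letter) + shift) % 26]
--             else:
--                 continue
--     else:
--         return " "
--     '''Shift Letter.
--     5 points.
--
--     Shift a letter right by the given number.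
--     Wrap the letter around if it reaches the end of the alphabet.
--
--     Examples:
--     shift_letter("A", 0) -> "A"
--     shift_letter("A", 2) -> "C"
--     shift_letter("Z", 1) -> "A"
--     shift_letter("X", 5) -> "C"
--     shift_letter(" ", _) -> " "
--
--     *Note: the single underscore `_` is used to acknowledge the presence
--         of a value without caring about its contents.
--
--     Parameters
--     ----------
--     letter: str
--         a single uppercase English letter, or a space.
--     shift: int
--         the number by which to shift the letter.
--
--     Returns
--     -------
--     str
--         the letter, shifted appropriately, if a letter.
--         a single space if the original letter was a space.
--     '''
--     # Replace `pass` with your code.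
--     # Stay within the function. Only use the parameters as input. The function should return your answer.
--     pass
-- ===== SOURCE B (Python) =====
-- def shift_letter(letter, shift):
--     if len(letter) == 1 and 'A' <= letter <= 'Z':
--         return chr((ord(letter) - 65 + shift) % 26 + 65)
--     return " "
-- ===== Notes on version B (the rewrite author's own statement) =====
-- stated objective: simpler
-- what changed: Replaces the 26-letter table, membership test, duplicate .index scans and the redundant for-loop with a single guard and closed-form chr/ord modular arithmetic.
import Mathlib
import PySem

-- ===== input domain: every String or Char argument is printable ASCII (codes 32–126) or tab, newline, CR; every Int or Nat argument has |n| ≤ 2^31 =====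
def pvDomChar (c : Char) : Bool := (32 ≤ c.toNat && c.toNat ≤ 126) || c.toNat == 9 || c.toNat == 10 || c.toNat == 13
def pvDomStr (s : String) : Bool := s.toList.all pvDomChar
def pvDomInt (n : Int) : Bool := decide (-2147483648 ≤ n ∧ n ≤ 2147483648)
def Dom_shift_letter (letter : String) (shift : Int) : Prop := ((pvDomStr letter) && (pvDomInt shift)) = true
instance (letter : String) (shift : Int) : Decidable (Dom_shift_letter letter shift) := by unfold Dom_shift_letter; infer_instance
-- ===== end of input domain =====

-- B replaces A's 26-letter table, membership test, .index scans and redundant loop with closed-form chr/ord modular arithmetic (objective: simpler).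

-- ===== PORT A =====
def pvAlphabet : List String :=
  ["A","B","C","D","E","F","G","H","I","J","K","L","M","N","O","P","Q","R","S","T","U","V","W","X","Y","Z"]

-- the loop's test: list_of_alphabet.index(i) == shift % 26
def pvCondA (m : Int) (i : String) : Bool :=
  match PySem.List.index? pvAlphabet i with
  | some k => ((k : Int) == m)
  | none => false

-- the for-loop: first i whose test fires returns v (the loop-invariant return expression)
def pvLoopA (m : Int) (v : String) : List String → Option String
  | [] => none
  | i :: rest => if pvCondA m i then some v else pvLoopA m v rest

def shift_letter (letter : String) (shift : Int) : String :=
  if pvAlphabet.contains letter then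
    -- list.index(letter) succeeds here (letter ∈ list): .getD 0 is unreachable;
    -- the subscript (index+shift) % 26 is always in range: .getD " " is unreachable;
    -- the loop always returns (shift % 26 ∈ [0,26)): the final .getD " " (Python's fall-through None) is unreachable
    (pvLoopA (PySem.Int.mod shift 26)
      ((PySem.List.pyGet? pvAlphabet
          (PySem.Int.mod ((((PySem.List.index? pvAlphabet letter).getD 0 : Nat) : Int) + shift) 26)).getD " ")
      pvAlphabet).getD " "
  else " "

-- ===== PORT B =====
def shift_letter_alt (letter : String) (shift : Int) : String :=
  if letter.toList.length = 1 ∧ 'A' ≤ letter.toList.headI ∧ letter.toList.headI ≤ 'Z' then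
    String.ofList [Char.ofNat ((PySem.Int.mod ((letter.toList.headI.toNat : Int) - 65 + shift) 26).toNat + 65)]
  else " "

-- ===== PRECONDITION & SPEC =====
def Spec_shift_letter (letter : String) (shift : Int) (out : String) : Prop := out = shift_letter_alt letter shift
instance (letter : String) (shift : Int) (out : String) : Decidable (Spec_shift_letter letter shift out) := by unfold Spec_shift_letter; infer_instance

-- ===== CLAIM (what is proved, stated in full; the proofs are below) =====
def Claim_equal_shift_letter : Prop := ∀ (letter : String) (shift : Int), Dom_shift_letter letter shift → Spec_shift_letter letter shift (shift_letter letter shift)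

-- ===== LEMMAS AND PROOFS =====
set_option maxRecDepth 8192

theorem pvLoopA_eq_any (m : Int) (v : String) (l : List String) :
    pvLoopA m v l = if l.any (pvCondA m) then some v else none := by
  induction l with
  | nil => simp [pvLoopA]
  | cons i rest ih => by_cases h : pvCondA m i <;> simp [pvLoopA, h, ih]

theorem pvAny_true (m : Int) (h0 : 0 ≤ m) (h1 : m < 26) :
    pvAlphabet.any (pvCondA m) = true := by
  interval_cases m <;> decide

theorem pvGet_alpha (j : Int) (h0 : 0 ≤ j) (h1 : j < 26) :
    PySem.List.pyGet? pvAlphabet j = some (String.ofList [Char.ofNat (j.toNat + 65)]) := by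
  interval_cases j <;> decide

theorem pvUpper_bounds (c : Char) (hA : 'A' ≤ c) (hZ : c ≤ 'Z') :
    65 ≤ c.toNat ∧ c.toNat ≤ 90 := by
  have h1 := UInt32.le_iff_toNat_le.mp (Char.le_def.mp hA)
  have h2 := UInt32.le_iff_toNat_le.mp (Char.le_def.mp hZ)
  exact ⟨h1, h2⟩

theorem pvMem_of_upper (c : Char) (hA : 'A' ≤ c) (hZ : c ≤ 'Z') :
    pvAlphabet.contains (String.ofList [c]) = true ∧
      PySem.List.index? pvAlphabet (String.ofList [c]) = some (c.toNat - 65) := by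
  obtain ⟨h1, h2⟩ := pvUpper_bounds c hA hZ
  have hc : c = Char.ofNat c.toNat := (Char.ofNat_toNat c).symm
  revert hc h1 h2
  generalize c.toNat = n
  intro h1 h2 hc
  subst hc
  interval_cases n <;> decide

theorem pvLetter_case (c : Char) (d : Nat) (shift : Int)
    (hcont : pvAlphabet.contains (String.ofList [c]) = true)
    (hidx : PySem.List.index? pvAlphabet (String.ofList [c]) = some d)
    (hA : 'A' ≤ c) (hZ : c ≤ 'Z')
    (hd : (c.toNat : Int) = (d : Int) + 65) :
    shift_letter (String.ofList [c]) shift = shift_letter_alt (String.ofList [c]) shift := by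
  have h26 : (0 : Int) < 26 := by norm_num
  have hm0 : 0 ≤ PySem.Int.mod shift 26 := PySem.Int.mod_nonneg _ h26
  have hm1 : PySem.Int.mod shift 26 < 26 := PySem.Int.mod_lt _ h26
  have hj0 : 0 ≤ PySem.Int.mod ((d : Int) + shift) 26 := PySem.Int.mod_nonneg _ h26
  have hj1 : PySem.Int.mod ((d : Int) + shift) 26 < 26 := PySem.Int.mod_lt _ h26
  unfold shift_letter shift_letter_alt
  rw [hidx]
  simp only [hcont, if_true, Option.getD_some]
  rw [pvLoopA_eq_any, pvAny_true _ hm0 hm1, if_pos rfl, Option.getD_some,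
      pvGet_alpha _ hj0 hj1, Option.getD_some]
  have harg : ((c.toNat : Int) - 65 + shift) = ((d : Int) + shift) := by omega
  simp [hA, hZ, harg]

theorem pvNotMem_case (letter : String) (shift : Int)
    (h : pvAlphabet.contains letter = false) :
    shift_letter_alt letter shift = " " := by
  unfold shift_letter_alt
  rw [if_neg]
  rintro ⟨h1, hA, hZ⟩
  have hl : letter.toList = [letter.toList.headI] := by
    cases hlist : letter.toList with
    | nil => rw [hlist] at h1; simp at h1
    | cons a t =>
      cases t with
      | nil => simp
      | cons b t' => rw [hlist] at h1; simp at h1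
  have hmem := (pvMem_of_upper letter.toList.headI hA hZ).1
  have hletter : letter = String.ofList [letter.toList.headI] := by
    conv_lhs => rw [← String.ofList_toList (s := letter), hl]
  rw [hletter, hmem] at h
  exact Bool.noConfusion h

-- ===== VERDICT (by name: the statement is the Claim_ definition above) =====
theorem shift_letter_spec : Claim_equal_shift_letter := by
  intro letter shift _
  unfold Spec_shift_letter
  by_cases hm : letter ∈ pvAlphabet
  · fin_cases hm <;>
      [ exact pvLetter_case 'A' 0 shift (by decide) (by decide) (by decide) (by decide) (by decide);
        exact pvLetter_case 'B' 1 shift (by decide) (by decide) (by decide) (by decide) (by decide);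
        exact pvLetter_case 'C' 2 shift (by decide) (by decide) (by decide) (by decide) (by decide);
        exact pvLetter_case 'D' 3 shift (by decide) (by decide) (by decide) (by decide) (by decide);
        exact pvLetter_case 'E' 4 shift (by decide) (by decide) (by decide) (by decide) (by decide);
        exact pvLetter_case 'F' 5 shift (by decide) (by decide) (by decide) (by decide) (by decide);
        exact pvLetter_case 'G' 6 shift (by decide) (by decide) (by decide) (by decide) (by decide);
        exact pvLetter_case 'H' 7 shift (by decide) (by decide) (by decide) (by decide) (by decide);
        exact pvLetter_case 'I' 8 shift (by decide) (by decide) (by decide) (by decide) (by decide);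
        exact pvLetter_case 'J' 9 shift (by decide) (by decide) (by decide) (by decide) (by decide);
        exact pvLetter_case 'K' 10 shift (by decide) (by decide) (by decide) (by decide) (by decide);
        exact pvLetter_case 'L' 11 shift (by decide) (by decide) (by decide) (by decide) (by decide);
        exact pvLetter_case 'M' 12 shift (by decide) (by decide) (by decide) (by decide) (by decide);
        exact pvLetter_case 'N' 13 shift (by decide) (by decide) (by decide) (by decide) (by decide);
        exact pvLetter_case 'O' 14 shift (by decide) (by decide) (by decide) (by decide) (by decide);
        exact pvLetter_case 'P' 15 shift (by decide) (by decide) (by decide) (by decide) (by decide);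
        exact pvLetter_case 'Q' 16 shift (by decide) (by decide) (by decide) (by decide) (by decide);
        exact pvLetter_case 'R' 17 shift (by decide) (by decide) (by decide) (by decide) (by decide);
        exact pvLetter_case 'S' 18 shift (by decide) (by decide) (by decide) (by decide) (by decide);
        exact pvLetter_case 'T' 19 shift (by decide) (by decide) (by decide) (by decide) (by decide);
        exact pvLetter_case 'U' 20 shift (by decide) (by decide) (by decide) (by decide) (by decide);
        exact pvLetter_case 'V' 21 shift (by decide) (by decide) (by decide) (by decide) (by decide);
        exact pvLetter_case 'W' 22 shift (by decide) (by decide) (by decide) (by decide) (by decide);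
        exact pvLetter_case 'X' 23 shift (by decide) (by decide) (by decide) (by decide) (by decide);
        exact pvLetter_case 'Y' 24 shift (by decide) (by decide) (by decide) (by decide) (by decide);
        exact pvLetter_case 'Z' 25 shift (by decide) (by decide) (by decide) (by decide) (by decide) ]
  · have hc : pvAlphabet.contains letter = false := by
      simpa [List.contains_iff_mem] using hm
    rw [pvNotMem_case letter shift hc]
    unfold shift_letter
    rw [hc]
    simp
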